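-- pv_equiv track=rewrite | github.com/TobiasErpen/DiceMagic | DiceMagic.py | GetNoOnes
-- ===== SOURCE A (Python) =====
-- def GetNoOnes(dice):
-- 	'''
-- 	Returns the sum of all dice treating all ones as twos.
-- 	'''
-- 	result = 0
-- 	for die in dice:
-- 		if 1 == die:
-- 			result += 2
-- 		else:
-- 			result += die
-- 	return result
-- ===== SOURCE B (Python) =====
-- def GetNoOnes(dice):
-- 	'''
-- 	Returns the sum of all dice treating all ones as twos.
-- 	'''
-- 	lst = list(dice)
-- 	return sum(lst) + lst.count(1)
-- ===== Notes on version B (the rewrite author's own statement) =====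
-- stated objective: simpler
-- what changed: Replaces the per-element if/else accumulator loop with an aggregate formulation: sum(dice) plus count of ones, since each 1 contributes exactly one extra.
import Mathlib
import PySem

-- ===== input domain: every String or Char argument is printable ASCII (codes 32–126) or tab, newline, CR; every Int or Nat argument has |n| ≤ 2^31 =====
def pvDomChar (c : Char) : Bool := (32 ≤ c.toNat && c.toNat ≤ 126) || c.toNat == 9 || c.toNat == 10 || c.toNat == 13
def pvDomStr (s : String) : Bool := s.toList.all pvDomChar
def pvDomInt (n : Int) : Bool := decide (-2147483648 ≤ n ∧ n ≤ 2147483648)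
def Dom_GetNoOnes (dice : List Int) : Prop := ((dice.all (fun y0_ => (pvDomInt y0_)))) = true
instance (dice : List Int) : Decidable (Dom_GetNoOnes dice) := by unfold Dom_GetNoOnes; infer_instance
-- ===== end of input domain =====

-- B replaces A's per-element if/else accumulation with sum(dice) + count of ones (simpler aggregate formulation, same cost).
-- ===== PORT A =====
def GetNoOnes (dice : List Int) : Int :=
  dice.foldl (fun result die => if 1 == die then result + 2 else result + die) 0

-- ===== PORT B =====
def GetNoOnes_alt (dice : List Int) : Int :=
  dice.sum + PySem.List.count dice 1

-- ===== PRECONDITION & SPEC =====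
def Spec_GetNoOnes (dice : List Int) (out : Int) : Prop := out = GetNoOnes_alt dice
instance (dice : List Int) (out : Int) : Decidable (Spec_GetNoOnes dice out) := by unfold Spec_GetNoOnes; infer_instance

-- ===== CLAIM (what is proved, stated in full; the proofs are below) =====
def Claim_equal_GetNoOnes : Prop := ∀ (dice : List Int), Dom_GetNoOnes dice → Spec_GetNoOnes dice (GetNoOnes dice)

-- ===== LEMMAS AND PROOFS =====

-- ===== VERDICT (by name: the statement is the Claim_ definition above) =====
theorem GetNoOnes_foldl (dice : List Int) (acc : Int) :
    dice.foldl (fun result die => if 1 == die then result + 2 else result + die) acc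
      = acc + dice.sum + PySem.List.count dice 1 := by
  induction dice generalizing acc with
  | nil => simp [PySem.List.count]
  | cons d ds ih =>
    rw [List.foldl_cons, ih]
    simp only [List.sum_cons, PySem.List.count, List.count_cons, beq_iff_eq]
    by_cases h : d = 1
    · subst h; rw [if_pos rfl, if_pos rfl]; push_cast; ring
    · rw [if_neg (fun e => h e.symm), if_neg h]; push_cast; ring

theorem GetNoOnes_spec : Claim_equal_GetNoOnes := by
  intro dice _
  unfold Spec_GetNoOnes GetNoOnes GetNoOnes_alt
  rw [GetNoOnes_foldl]; ring
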